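-- pv_equiv track=rewrite | github.com/Simon-Will/nlmaps-tools | nlmaps_tools/mrl/mrl.py | delete_spaces
-- ===== SOURCE A (Python) =====
-- def delete_spaces(mrl):
--     quotes_seen = 0
--     new_chars = []
--     for c in mrl:
--         if c == "'":
--             quotes_seen += 1
--         if c != ' ' or quotes_seen % 2 != 0:
--             new_chars.append(c)
--
--     return ''.join(new_chars)
-- ===== SOURCE B (Python) =====
-- def delete_spaces(mrl):
--     segments = mrl.split("'")
--     return "'".join(seg.replace(' ', '') if i % 2 == 0 else seg
--                     for i, seg in enumerate(segments))
-- ===== Notes on version B (the rewrite author's own statement) =====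
-- stated objective: simpler
-- what changed: Replaces A's per-character quote-parity state machine with split on the quote character, stripping spaces only from even-indexed (outside-quote) segments, and rejoining.
import Mathlib
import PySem

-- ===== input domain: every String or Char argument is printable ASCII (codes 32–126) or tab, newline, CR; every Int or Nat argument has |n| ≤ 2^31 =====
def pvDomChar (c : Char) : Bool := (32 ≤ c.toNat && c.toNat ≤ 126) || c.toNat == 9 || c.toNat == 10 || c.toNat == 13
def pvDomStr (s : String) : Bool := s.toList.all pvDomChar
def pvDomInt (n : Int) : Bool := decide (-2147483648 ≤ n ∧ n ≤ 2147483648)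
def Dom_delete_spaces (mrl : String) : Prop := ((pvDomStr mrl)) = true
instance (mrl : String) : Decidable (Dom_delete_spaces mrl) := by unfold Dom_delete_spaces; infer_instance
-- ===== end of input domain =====

-- B replaces A's per-character quote-parity state machine by split-on-quote, stripping
-- spaces only from even-indexed (outside-quote) segments, then rejoining (objective: simpler).

-- ===== PORT A =====
def delete_spaces (mrl : String) : String :=
  let st := mrl.toList.foldl
    (fun (st : Nat × List Char) c =>
      let quotes_seen := if c = '\'' then st.1 + 1 else st.1
      if c ≠ ' ' ∨ quotes_seen % 2 ≠ 0 then (quotes_seen, st.2 ++ [c])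
      else (quotes_seen, st.2))
    (0, [])
  String.ofList st.2

-- ===== PORT B =====
def delete_spaces_alt (mrl : String) : String :=
  let segments := PySem.Chars.splitOn mrl.toList ['\'']
  String.ofList (PySem.Chars.join ['\'']
    ((List.zipIdx segments).map
      (fun p => if p.2 % 2 == 0 then PySem.Chars.replace p.1 [' '] [] else p.1)))

-- ===== PRECONDITION & SPEC =====
def Spec_delete_spaces (mrl : String) (out : String) : Prop := out = delete_spaces_alt mrl
instance (mrl : String) (out : String) : Decidable (Spec_delete_spaces mrl out) := by unfold Spec_delete_spaces; infer_instance

-- ===== CLAIM (what is proved, stated in full; the proofs are below) =====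
def Claim_equal_delete_spaces : Prop := ∀ (mrl : String), Dom_delete_spaces mrl → Spec_delete_spaces mrl (delete_spaces mrl)

-- ===== LEMMAS AND PROOFS =====

-- a simple recursive characterisation of splitting on the quote character
def pvSplit : List Char → List (List Char)
  | [] => [[]]
  | c :: cs =>
    if c = '\'' then [] :: pvSplit cs
    else
      match pvSplit cs with
      | [] => [[c]]
      | h :: t => (c :: h) :: t

def pvPrepend (p : List Char) : List (List Char) → List (List Char)
  | [] => [p]
  | h :: t => (p ++ h) :: t

lemma pvSplit_ne_nil (cs : List Char) : pvSplit cs ≠ [] := by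
  cases cs with
  | nil => simp [pvSplit]
  | cons c cs =>
    simp only [pvSplit]
    split
    · simp
    · cases pvSplit cs <;> simp

lemma go_succ_cons (f : Nat) (c : Char) (rest cur : List Char) (acc : List (List Char)) :
    PySem.Chars.splitOn.go ['\''] (f+1) (c :: rest) cur acc =
      if ['\''].isPrefixOf (c :: rest) = true then
        PySem.Chars.splitOn.go ['\''] f rest [] (cur.reverse :: acc)
      else PySem.Chars.splitOn.go ['\''] f rest (c :: cur) acc := rfl

lemma splitOn_go_eq (l : List Char) : ∀ (fuel : Nat) (cur : List Char) (acc : List (List Char)),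
    l.length ≤ fuel →
    PySem.Chars.splitOn.go ['\''] fuel l cur acc = acc.reverse ++ pvPrepend cur.reverse (pvSplit l) := by
  induction l with
  | nil =>
    intro fuel cur acc _
    cases fuel <;> simp [PySem.Chars.splitOn.go, pvSplit, pvPrepend]
  | cons c rest ih =>
    intro fuel cur acc hf
    cases fuel with
    | zero => simp at hf
    | succ f =>
      rw [go_succ_cons]
      by_cases hc : c = '\''
      · subst hc
        rw [if_pos (by simp [List.isPrefixOf])]
        rw [ih f [] (cur.reverse :: acc) (by simpa using hf)]
        cases h : pvSplit rest with
        | nil => exact absurd h (pvSplit_ne_nil rest)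
        | cons h' t => simp [pvPrepend, pvSplit, h]
      · rw [if_neg (by simp only [List.isPrefixOf, Bool.and_eq_true, beq_iff_eq]; exact fun hh => hc hh.1.symm)]
        rw [ih f (c :: cur) acc (by simpa using Nat.le_of_succ_le_succ hf)]
        simp only [pvSplit, hc, if_false]
        cases h : pvSplit rest with
        | nil => exact absurd h (pvSplit_ne_nil rest)
        | cons h' t => simp [pvPrepend]

lemma splitOn_eq (cs : List Char) : PySem.Chars.splitOn cs ['\''] = pvSplit cs := by
  rw [PySem.Chars.splitOn, splitOn_go_eq cs (cs.length + 1) [] [] (by omega)]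
  cases h : pvSplit cs with
  | nil => exact absurd h (pvSplit_ne_nil cs)
  | cons h' t => simp [pvPrepend]

lemma rgo_succ_cons (f : Nat) (c : Char) (rest acc : List Char) :
    PySem.Chars.replace.go [' '] [] (f+1) (c :: rest) acc =
      if [' '].isPrefixOf (c :: rest) = true then
        PySem.Chars.replace.go [' '] [] f rest acc
      else PySem.Chars.replace.go [' '] [] f rest (c :: acc) := rfl

lemma replace_go_eq (l : List Char) : ∀ (fuel : Nat) (acc : List Char),
    l.length ≤ fuel →
    PySem.Chars.replace.go [' '] [] fuel l acc = acc.reverse ++ l.filter (· ≠ ' ') := by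
  induction l with
  | nil => intro fuel acc _; cases fuel <;> simp [PySem.Chars.replace.go]
  | cons c rest ih =>
    intro fuel acc hf
    cases fuel with
    | zero => simp at hf
    | succ f =>
      rw [rgo_succ_cons]
      by_cases hc : c = ' '
      · subst hc
        rw [if_pos (by simp [List.isPrefixOf])]
        rw [ih f _ (by simpa using hf)]
        simp
      · rw [if_neg (by simp only [List.isPrefixOf, Bool.and_eq_true, beq_iff_eq]; exact fun hh => hc hh.1.symm)]
        rw [ih f _ (by simpa using Nat.le_of_succ_le_succ hf)]
        simp [hc]

lemma replace_space_eq (s : List Char) :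
    PySem.Chars.replace s [' '] [] = s.filter (· ≠ ' ') := by
  rw [PySem.Chars.replace]
  simp only [List.isEmpty_cons, Bool.false_eq_true, if_false]
  exact replace_go_eq s s.length [] le_rfl

-- one-pass reference: drop spaces while outside quotes, keep everything inside
def pvSimple : Bool → List Char → List Char
  | _, [] => []
  | inside, c :: cs =>
    if c = '\'' then c :: pvSimple (!inside) cs
    else if c = ' ' ∧ inside = false then pvSimple inside cs
    else c :: pvSimple inside cs

-- A-side characterisation of the fold
def pvSpecA (q : Nat) : List Char → List Char
  | [] => []
  | c :: cs =>
    let q' := if c = '\'' then q + 1 else q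
    (if c ≠ ' ' ∨ q' % 2 ≠ 0 then [c] else []) ++ pvSpecA q' cs

lemma foldA_eq (cs : List Char) : ∀ (q : Nat) (acc : List Char),
    (cs.foldl
      (fun (st : Nat × List Char) c =>
        let quotes_seen := if c = '\'' then st.1 + 1 else st.1
        if c ≠ ' ' ∨ quotes_seen % 2 ≠ 0 then (quotes_seen, st.2 ++ [c])
        else (quotes_seen, st.2))
      (q, acc)).2 = acc ++ pvSpecA q cs := by
  induction cs with
  | nil => intro q acc; simp [pvSpecA]
  | cons c cs ih =>
    intro q acc
    simp only [List.foldl_cons, pvSpecA]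
    by_cases h : (c ≠ ' ' ∨ (if c = '\'' then q + 1 else q) % 2 ≠ 0)
    · simp only [if_pos h, ih]; simp
    · simp only [if_neg h, ih]; simp

lemma specA_eq_simple (cs : List Char) : ∀ (q : Nat),
    pvSpecA q cs = pvSimple (q % 2 == 1) cs := by
  induction cs with
  | nil => intro q; simp [pvSpecA, pvSimple]
  | cons c cs ih =>
    intro q
    by_cases hc : c = '\''
    · subst hc
      have hq : ((q + 1) % 2 == 1) = !(q % 2 == 1) := by
        rcases Nat.mod_two_eq_zero_or_one q with h | h <;> simp [Nat.add_mod, h]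
      simp [pvSpecA, pvSimple, ih, hq]
    · by_cases hs : c = ' '
      · subst hs
        simp only [pvSpecA, pvSimple, if_neg hc]
        rcases Nat.mod_two_eq_zero_or_one q with h | h <;> simp [h, ih]
      · simp [pvSpecA, pvSimple, hc, hs, ih]

-- B-side: the enumerate-map as an alternating keep/filter process
def pvProc : Bool → List (List Char) → List (List Char)
  | _, [] => []
  | inside, s :: ss =>
    (if inside then s else s.filter (· ≠ ' ')) :: pvProc (!inside) ss

lemma zipIdx_map_eq (ss : List (List Char)) : ∀ (n : Nat),
    (List.zipIdx ss n).map
      (fun p => if p.2 % 2 == 0 then PySem.Chars.replace p.1 [' '] [] else p.1)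
      = pvProc (n % 2 == 1) ss := by
  induction ss with
  | nil => intro n; simp [pvProc]
  | cons s ss ih =>
    intro n
    simp only [List.zipIdx_cons, List.map_cons, ih (n + 1), pvProc]
    rcases Nat.mod_two_eq_zero_or_one n with h | h <;>
      simp [h, Nat.add_mod, replace_space_eq]

lemma join_cons_any (sep x : List Char) (l : List (List Char)) :
    PySem.Chars.join sep (x :: l) = x ++ if l.isEmpty then [] else sep ++ PySem.Chars.join sep l := by
  cases l <;> simp [PySem.Chars.join, List.intercalate, List.intersperse]

lemma pvProc_isEmpty (b : Bool) (l : List (List Char)) : (pvProc b l).isEmpty = l.isEmpty := by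
  cases l <;> simp [pvProc]

lemma join_proc_eq (cs : List Char) : ∀ (inside : Bool),
    PySem.Chars.join ['\''] (pvProc inside (pvSplit cs)) = pvSimple inside cs := by
  induction cs with
  | nil =>
    intro inside
    cases inside <;> simp [pvSplit, pvProc, pvSimple, PySem.Chars.join, List.intercalate]
  | cons c cs ih =>
    intro inside
    by_cases hc : c = '\''
    · subst hc
      rw [show pvSplit ('\'' :: cs) = [] :: pvSplit cs from by simp [pvSplit]]
      simp only [pvProc, join_cons_any, pvProc_isEmpty]
      have hne : (pvSplit cs).isEmpty = false := by
        cases h : pvSplit cs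
        · exact absurd h (pvSplit_ne_nil cs)
        · simp
      rw [hne]
      simp [pvSimple, ih]
    · cases h : pvSplit cs with
      | nil => exact absurd h (pvSplit_ne_nil cs)
      | cons h' t =>
        have hthis := ih inside
        rw [h] at hthis
        simp only [pvProc, join_cons_any, pvProc_isEmpty] at hthis
        simp only [pvSplit, hc, if_false, h, pvProc, join_cons_any, pvProc_isEmpty]
        cases inside with
        | true =>
          simp only [pvSimple, hc, if_false] at hthis ⊢
          simp [← hthis]
        | false =>
          by_cases hs : c = ' '
          · subst hs
            simp only [pvSimple, hc, if_false] at hthis ⊢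
            simp [← hthis]
          · simp only [pvSimple, hc, if_false] at hthis ⊢
            simp [← hthis, hs]

lemma both_eq (mrl : String) : delete_spaces mrl = delete_spaces_alt mrl := by
  rw [delete_spaces, delete_spaces_alt]
  simp only [splitOn_eq, zipIdx_map_eq _ 0, foldA_eq, List.nil_append]
  norm_num [specA_eq_simple, join_proc_eq]

-- ===== VERDICT (by name: the statement is the Claim_ definition above) =====
theorem delete_spaces_spec : Claim_equal_delete_spaces := by
  intro mrl _
  unfold Spec_delete_spaces
  exact both_eq mrl
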